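-- pv_equiv track=rewrite | github.com/eyesfocus/mi-hsrm-sem3-prog3 | abgaben/py_abg09/generatoren.py | von_vorne
-- ===== SOURCE A (Python) =====
-- def von_vorne(g):
--     g_liste = list(g)
--     i, j = 0, 0
--
--     while j < len(g_liste):
--         while i <= j:
--             yield g_liste[i]
--             i += 1
--         i = 0
--         j += 1
-- ===== SOURCE B (Python) =====
-- def von_vorne(g):
--     g_liste = list(g)
--
--     def rec(lo, hi):
--         # concatenation of the prefixes of g_liste of lengths lo+1 .. hi,
--         # by divide and conquer on the range of prefix lengths
--         if hi - lo == 0: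
--             return []
--         if hi - lo == 1:
--             return g_liste[:hi]
--         mid = (lo + hi) // 2
--         return rec(lo, mid) + rec(mid, hi)
--
--     yield from rec(0, len(g_liste))
-- ===== Notes on version B (the rewrite author's own statement) =====
-- stated objective: alternative
-- what changed: Replace A's nested index-reset while loops with divide and conquer: the range of prefix lengths is split in half recursively, a singleton range yields the corresponding slice, and halves are concatenated (binary splitting instead of two nested linear loops).
import Mathlib
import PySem

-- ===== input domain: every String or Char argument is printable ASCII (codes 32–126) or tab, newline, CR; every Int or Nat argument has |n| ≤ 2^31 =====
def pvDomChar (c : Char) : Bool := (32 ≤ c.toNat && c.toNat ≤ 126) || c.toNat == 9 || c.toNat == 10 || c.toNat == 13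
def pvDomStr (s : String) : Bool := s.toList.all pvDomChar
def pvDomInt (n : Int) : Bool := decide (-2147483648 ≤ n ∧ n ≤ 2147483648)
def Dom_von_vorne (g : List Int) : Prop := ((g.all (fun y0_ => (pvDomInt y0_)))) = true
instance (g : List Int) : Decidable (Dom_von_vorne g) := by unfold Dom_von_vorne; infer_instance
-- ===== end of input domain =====

-- B replaces A's nested index-reset while loops with divide and conquer on the range
-- of prefix lengths (objective: alternative, similar cost).

-- ===== PORT A =====
-- inner 'while i <= j: yield g_liste[i]; i += 1'
def pvInnerA (gl : List Int) (i j : Nat) : List Int :=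
  if i ≤ j then PySem.List.pyGetD gl (i : Int) 0 :: pvInnerA gl (i + 1) j else []
termination_by j + 1 - i

-- outer 'while j < len(g_liste): … ; i = 0; j += 1'
def pvOuterA (gl : List Int) (j : Nat) : List Int :=
  if j < gl.length then pvInnerA gl 0 j ++ pvOuterA gl (j + 1) else []
termination_by gl.length - j

def von_vorne (g : List Int) : List Int := pvOuterA g 0

-- ===== PORT B =====
-- 'def rec(lo, hi): if hi-lo==0: []; if hi-lo==1: g_liste[:hi]; mid=(lo+hi)//2; rec(lo,mid)+rec(mid,hi)'
def pvRecB (gl : List Int) (lo hi : Nat) : List Int :=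
  if hi - lo = 0 then []
  else if hi - lo = 1 then PySem.List.slice gl none (some (hi : Int))
  else pvRecB gl lo ((lo + hi) / 2) ++ pvRecB gl ((lo + hi) / 2) hi
termination_by hi - lo
decreasing_by all_goals omega

-- 'yield from rec(0, len(g_liste))'
def von_vorne_alt (g : List Int) : List Int := pvRecB g 0 g.length

-- ===== PRECONDITION & SPEC =====
def Spec_von_vorne (g : List Int) (out : List Int) : Prop := out = von_vorne_alt g
instance (g : List Int) (out : List Int) : Decidable (Spec_von_vorne g out) := by unfold Spec_von_vorne; infer_instance

-- ===== CLAIM (what is proved, stated in full; the proofs are below) =====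
def Claim_equal_von_vorne : Prop := ∀ (g : List Int), Dom_von_vorne g → Spec_von_vorne g (von_vorne g)

-- ===== LEMMAS AND PROOFS =====

theorem pvInnerA_eq_map (gl : List Int) (j : Nat) :
    ∀ i, i ≤ j + 1 → pvInnerA gl i j = (List.range' i (j + 1 - i)).map (fun (k : Nat) => PySem.List.pyGetD gl (k : Int) 0) := by
  intro i hi
  induction hn : j + 1 - i generalizing i with
  | zero =>
      have : ¬ i ≤ j := by omega
      rw [pvInnerA]
      simp [this]
  | succ n ih =>
      have hij : i ≤ j := by omega
      rw [pvInnerA]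
      simp only [hij, if_pos, List.range'_succ, List.map_cons]
      have := ih (i + 1) (by omega) (by omega)
      rw [this]

theorem pvInnerA_zero_take (gl : List Int) (j : Nat) (hj : j < gl.length) :
    pvInnerA gl 0 j = gl.take (j + 1) := by
  rw [pvInnerA_eq_map gl j 0 (by omega)]
  simp only [Nat.sub_zero]
  apply List.ext_getElem
  · simp; omega
  · intro k h1 h2
    have hk : k < j + 1 := by simpa using h1
    have hkl : k < gl.length := by omega
    simp [PySem.List.pyGetD_natCast, List.getD_eq_getElem?_getD, List.getElem?_eq_getElem hkl]

theorem pvOuterA_eq (gl : List Int) :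
    ∀ j, pvOuterA gl j = (List.range' j (gl.length - j)).flatMap (fun k => gl.take (k + 1)) := by
  intro j
  induction hn : gl.length - j generalizing j with
  | zero =>
      have : ¬ j < gl.length := by omega
      rw [pvOuterA]
      simp [this]
  | succ n ih =>
      have hj : j < gl.length := by omega
      rw [pvOuterA]
      simp only [hj, if_pos, List.range'_succ, List.flatMap_cons]
      rw [pvInnerA_zero_take gl j hj, ih (j + 1) (by omega)]

theorem pvRecB_eq (gl : List Int) :
    ∀ n lo hi, hi - lo = n → lo ≤ hi →
      pvRecB gl lo hi = (List.range' lo (hi - lo)).flatMap (fun k => gl.take (k + 1)) := by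
  intro n
  induction n using Nat.strong_induction_on with
  | _ n ih =>
      intro lo hi hn hle
      rw [pvRecB]
      by_cases h0 : hi - lo = 0
      · simp [h0]
      · by_cases h1 : hi - lo = 1
        · have hhi : hi = lo + 1 := by omega
          rw [if_neg h0, if_pos h1, h1, hhi,
              PySem.List.slice_to_natCast]
          simp [List.range'_succ]
        · rw [if_neg h0, if_neg h1]
          have hm1 : ((lo + hi) / 2) - lo < n := by omega
          have hm2 : hi - ((lo + hi) / 2) < n := by omega
          rw [ih _ hm1 lo _ rfl (by omega), ih _ hm2 _ hi rfl (by omega)]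
          obtain ⟨m, hm⟩ : ∃ m, (lo + hi) / 2 = lo + m := ⟨(lo + hi) / 2 - lo, by omega⟩
          have hub : lo + m ≤ hi := by omega
          rw [← List.flatMap_append, hm]
          have h2 := @List.range'_append_1 lo m (hi - (lo + m))
          rw [show lo + m - lo = m by omega, h2,
              show m + (hi - (lo + m)) = hi - lo from by omega]

-- ===== VERDICT (by name: the statement is the Claim_ definition above) =====
theorem von_vorne_spec : Claim_equal_von_vorne := by
  intro g _
  unfold Spec_von_vorne von_vorne von_vorne_alt
  rw [pvOuterA_eq g 0, pvRecB_eq g g.length 0 g.length (by omega) (by omega)]
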